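-- pv_equiv track=rewrite | github.com/inshinrei/playground-py | leet-code/y23q3/find-the-divisibility-arr-of-a-str.py | find
-- ===== SOURCE A (Python) =====
-- def find(word, m):
--     result = []
--     prev = 0
--     for c in word:
--         remainder = (prev * 10 + int(c)) % m
--         result.append(1 if remainder == 0 else 0)
--         prev = remainder
--     return result
-- ===== SOURCE B (Python) =====
-- def find(word, m):
--     # Phase 1: the remainder sequence, built recursively front-to-back.
--     def rems(i, prev):
--         if i == len(word):
--             return []
--         r = (prev * 10 + int(word[i])) % m
--         return [r] + rems(i + 1, r)
--     # Phase 2: map remainders to divisibility flags.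
--     return [1 if r == 0 else 0 for r in rems(0, 0)]
-- ===== Notes on version B (the rewrite author's own statement) =====
-- stated objective: alternative
-- what changed: Replaces A's single imperative loop that appends flags while threading the remainder with a two-phase decomposition: a recursive helper builds the remainder sequence front-to-back by consing, then a comprehension maps remainders to 0/1 flags.
-- outside the precondition, e.g. on find('1a', 3): A raises ValueError, B raises ValueError; on find('12', 0): A raises ZeroDivisionError, B raises ZeroDivisionError
import Mathlib
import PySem

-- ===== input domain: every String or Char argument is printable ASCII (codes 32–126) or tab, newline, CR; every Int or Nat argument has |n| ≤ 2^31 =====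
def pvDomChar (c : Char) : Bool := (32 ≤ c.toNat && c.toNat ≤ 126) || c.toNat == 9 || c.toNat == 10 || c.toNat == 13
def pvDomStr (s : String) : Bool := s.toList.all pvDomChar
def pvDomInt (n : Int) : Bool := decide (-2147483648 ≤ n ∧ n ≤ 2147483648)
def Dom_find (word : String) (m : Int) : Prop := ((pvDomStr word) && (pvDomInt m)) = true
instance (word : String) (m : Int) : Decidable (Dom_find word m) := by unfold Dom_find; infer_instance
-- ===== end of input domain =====

-- B replaces A's single append-loop by a recursive remainder-sequence builder plus a flag-mapping pass (alternative decomposition, same cost).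

-- ===== PORT A =====
-- int(c) for a single character c, totalised with 0; Pre_find restricts to digits, where it is exact
def pyIntChar (c : Char) : Int := (PySem.Int.ofStr? (String.singleton c)).getD 0

def findStep (m : Int) (st : List Int × Int) (c : Char) : List Int × Int :=
  let remainder := PySem.Int.mod (st.2 * 10 + pyIntChar c) m
  (st.1 ++ [if remainder = 0 then (1 : Int) else 0], remainder)

def find (word : String) (m : Int) : List Int :=
  (word.toList.foldl (findStep m) ([], 0)).1

-- ===== PORT B =====
-- phase 1 of Source B: the remainder sequence, built recursively front-to-back (index recursion ported as suffix recursion)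
def findRems (m : Int) : List Char → Int → List Int
  | [], _ => []
  | c :: cs, prev =>
    let r := PySem.Int.mod (prev * 10 + pyIntChar c) m
    r :: findRems m cs r

-- phase 2 of Source B: map remainders to divisibility flags
def find_alt (word : String) (m : Int) : List Int :=
  (findRems m word.toList 0).map (fun r => if r = 0 then (1 : Int) else 0)

-- ===== PRECONDITION & SPEC =====
-- Pre excludes inputs where A raises: a non-digit character (ValueError from int(c)) or m = 0 with a nonempty word (ZeroDivisionError)
def Pre_find (word : String) (m : Int) : Prop :=
  (word.toList.all (fun c => c.isDigit)) = true ∧ (word.toList = [] ∨ m ≠ 0)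
instance (word : String) (m : Int) : Decidable (Pre_find word m) := by unfold Pre_find; infer_instance

def pvWitness_find : String × Int := ("1917", 3)

def Spec_find (word : String) (m : Int) (out : List Int) : Prop := out = find_alt word m
instance (word : String) (m : Int) (out : List Int) : Decidable (Spec_find word m out) := by unfold Spec_find; infer_instance

-- ===== CLAIM (what is proved, stated in full; the proofs are below) =====
def Claim_equal_find : Prop := ∀ (word : String) (m : Int), Dom_find word m → Pre_find word m → Spec_find word m (find word m)

-- ===== LEMMAS AND PROOFS =====
theorem find_foldl_eq (m : Int) (cs : List Char) :
    ∀ (prev : Int) (acc : List Int),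
      (cs.foldl (findStep m) (acc, prev)).1
        = acc ++ (findRems m cs prev).map (fun r => if r = 0 then (1 : Int) else 0) := by
  induction cs with
  | nil => intro prev acc; simp [findRems]
  | cons c cs ih =>
    intro prev acc
    simp only [List.foldl_cons, findRems, List.map_cons, findStep]
    rw [ih]
    simp

-- ===== VERDICT (by name: the statement is the Claim_ definition above) =====
theorem find_spec : Claim_equal_find := by
  intro word m _ _
  unfold Spec_find find find_alt
  exact find_foldl_eq m word.toList 0 []
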